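-- pv_equiv track=rewrite | github.com/pragmatest-dev/lvkit | src/vipy/vilib_resolver.py | derive_python_name
-- ===== SOURCE A (Python) =====
-- def derive_python_name(typedef_name: str) -> str:
--     """Derive Python class name from typedef qualified name.
--
--     Args:
--         typedef_name: Qualified name like "sysdir.llb:System Directory Type.ctl"
--
--     Returns:
--         Python class name like "SystemDirectoryType"
--     """
--     # Extract filename from qualified name
--     if ":" in typedef_name:
--         filename = typedef_name.split(":")[-1]
--     else:
--         filename = typedef_name
--
--     # Remove .ctl extension
--     name = filename.replace(".ctl", "")
--
--     # Convert to CamelCase: "System Directory Type" -> "SystemDirectoryType"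
--     # Replace hyphens and underscores with spaces for splitting
--     name = name.replace("-", " ").replace("_", " ")
--     result = "".join(word.capitalize() for word in name.split())
--     # Ensure the result is a valid Python identifier
--     result = "".join(c for c in result if c.isalnum() or c == "_")
--     return result or "UnknownType"
-- ===== SOURCE B (Python) =====
-- def derive_python_name(typedef_name: str) -> str:
--     # Single fused pass: take the part after the last ':', drop '.ctl', then
--     # CamelCase it character by character with a word-start flag (no word list).
--     s = typedef_name.split(":")[-1].replace(".ctl", "")
--     out = []
--     at_word_start = True
--     for c in s:
--         if c.isspace() or c == "-" or c == "_":
--             at_word_start = True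
--         elif c.isalnum():
--             out.append(c.upper() if at_word_start else c.lower())
--             at_word_start = False
--         else:
--             at_word_start = False
--     return "".join(out) or "UnknownType"
-- ===== Notes on version B (the rewrite author's own statement) =====
-- stated objective: simpler
-- what changed: Replaces the split-into-words / capitalize-each / join / filter pipeline by a single character scan that carries a word-start flag and emits each alphanumeric character uppercased at a word start and lowercased otherwise.
import Mathlib
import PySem

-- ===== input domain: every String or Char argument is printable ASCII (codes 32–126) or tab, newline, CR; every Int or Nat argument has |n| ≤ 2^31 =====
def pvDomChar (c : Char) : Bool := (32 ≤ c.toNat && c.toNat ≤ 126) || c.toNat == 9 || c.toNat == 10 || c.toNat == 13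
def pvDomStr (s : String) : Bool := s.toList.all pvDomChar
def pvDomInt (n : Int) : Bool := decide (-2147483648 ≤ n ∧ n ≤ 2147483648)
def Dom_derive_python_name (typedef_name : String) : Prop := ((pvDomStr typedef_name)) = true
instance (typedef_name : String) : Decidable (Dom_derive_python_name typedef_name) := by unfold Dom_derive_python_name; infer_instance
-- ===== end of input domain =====

-- B fuses split/capitalize/join/filter into one character scan with a word-start flag (objective: simpler one-pass decomposition, same cost).

-- ===== PORT A =====
-- str.capitalize: first char titlecased, rest lowered; titlecase = uppercase on the ASCII domain
def pvCapitalize (w : List Char) : List Char :=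
  match w with
  | [] => []
  | c :: cs => PySem.Chars.upperChar c :: cs.map PySem.Chars.lowerChar

def derive_python_name (typedef_name : String) : String :=
  let s := typedef_name.toList
  let filename :=
    if PySem.Chars.isIn [':'] s then
      -- typedef_name.split(":")[-1]; split(":") never yields an empty list, so [-1] never raises
      match PySem.List.pyGet? (PySem.Chars.splitOn s [':']) (-1) with
      | some w => w
      | none => []
    else s
  let name := PySem.Chars.replace filename ".ctl".toList []
  let name2 := PySem.Chars.replace (PySem.Chars.replace name ['-'] [' ']) ['_'] [' ']
  let result := PySem.Chars.join [] ((PySem.Chars.split₀ name2).map pvCapitalize)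
  let result2 := result.filter (fun c => PySem.Chars.isalnum c || c == '_')
  if result2.isEmpty then "UnknownType" else String.mk result2

-- ===== PORT B =====
def derive_python_name_alt (typedef_name : String) : String :=
  let s0 := typedef_name.toList
  -- typedef_name.split(":")[-1]; split(":") never yields an empty list, so [-1] never raises
  let tail :=
    match PySem.List.pyGet? (PySem.Chars.splitOn s0 [':']) (-1) with
    | some w => w
    | none => []
  let s := PySem.Chars.replace tail ".ctl".toList []
  let st := s.foldl (fun (st : List Char × Bool) c =>
    if PySem.Chars.isspace c || c == '-' || c == '_' then (st.1, true)
    else if PySem.Chars.isalnum c then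
      (st.1 ++ [if st.2 then PySem.Chars.upperChar c else PySem.Chars.lowerChar c], false)
    else (st.1, false)) ([], true)
  -- "".join(out) of single-character strings is their concatenation
  if st.1.isEmpty then "UnknownType" else String.mk st.1

-- ===== PRECONDITION & SPEC =====
def Spec_derive_python_name (typedef_name : String) (out : String) : Prop := out = derive_python_name_alt typedef_name
instance (typedef_name : String) (out : String) : Decidable (Spec_derive_python_name typedef_name out) := by unfold Spec_derive_python_name; infer_instance

-- ===== CLAIM (what is proved, stated in full; the proofs are below) =====
def Claim_equal_derive_python_name : Prop := ∀ (typedef_name : String), Dom_derive_python_name typedef_name → Spec_derive_python_name typedef_name (derive_python_name typedef_name)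

-- ===== LEMMAS AND PROOFS =====

-- abbreviations used only by the proofs
def pvP (c : Char) : Bool := PySem.Chars.isalnum c || c == '_'
def pvSep (c : Char) : Bool := PySem.Chars.isspace c || c == '-' || c == '_'
def pvSubst (a b c : Char) : Char := if c == a then b else c
def pvSub2 (c : Char) : Char := pvSubst '_' ' ' (pvSubst '-' ' ' c)

-- words of l split on Python whitespace (spec of Chars.split₀)
def pvWords (l : List Char) : List (List Char) :=
  match l with
  | [] => []
  | c :: cs =>
    if PySem.Chars.isspace c then pvWords cs
    else (c :: cs.takeWhile (fun d => !PySem.Chars.isspace d)) ::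
         pvWords (cs.dropWhile (fun d => !PySem.Chars.isspace d))
termination_by l.length
decreasing_by
  · simp
  · simp only [List.length_cons]
    have := List.length_dropWhile_le (fun d => !PySem.Chars.isspace d) cs
    omega

-- words of l split on pvSep, keeping the original characters
def pvWordsB (l : List Char) : List (List Char) :=
  match l with
  | [] => []
  | c :: cs =>
    if pvSep c then pvWordsB cs
    else (c :: cs.takeWhile (fun d => !pvSep d)) :: pvWordsB (cs.dropWhile (fun d => !pvSep d))
termination_by l.length
decreasing_by
  · simp
  · simp only [List.length_cons]
    have := List.length_dropWhile_le (fun d => !pvSep d) cs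
    omega

-- functional form of B's scan
def pvScan (l : List Char) (flag : Bool) : List Char :=
  match l with
  | [] => []
  | c :: cs =>
    if pvSep c then pvScan cs true
    else if PySem.Chars.isalnum c then
      (if flag then PySem.Chars.upperChar c else PySem.Chars.lowerChar c) :: pvScan cs false
    else pvScan cs false

-- ---- character lemmas ----
theorem pv_toNat_sub32 (c : Char) (h : 97 ≤ c.toNat) (h2 : c.toNat ≤ 122) :
    (Char.ofNat (c.toNat - 32)).toNat = c.toNat - 32 := by
  rw [Char.toNat_ofNat, if_pos]; left; omega

theorem pv_toNat_add32 (c : Char) (h : 65 ≤ c.toNat) (h2 : c.toNat ≤ 90) :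
    (Char.ofNat (c.toNat + 32)).toNat = c.toNat + 32 := by
  rw [Char.toNat_ofNat, if_pos]; left; omega

theorem pv_le_iff (a b : Char) : (a ≤ b) ↔ a.toNat ≤ b.toNat := by
  rw [Char.le_def, UInt32.le_iff_toNat_le]; rfl

theorem pv_islower_iff (c : Char) : PySem.Chars.islower c = true ↔ 97 ≤ c.toNat ∧ c.toNat ≤ 122 := by
  simp [PySem.Chars.islower, pv_le_iff]

theorem pv_isupper_iff (c : Char) : PySem.Chars.isupper c = true ↔ 65 ≤ c.toNat ∧ c.toNat ≤ 90 := by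
  simp [PySem.Chars.isupper, pv_le_iff]

theorem pv_isdigit_iff (c : Char) : PySem.Chars.isdigit c = true ↔ 48 ≤ c.toNat ∧ c.toNat ≤ 57 := by
  simp [PySem.Chars.isdigit, pv_le_iff]

theorem pv_isalnum_iff (c : Char) : PySem.Chars.isalnum c = true ↔
    (65 ≤ c.toNat ∧ c.toNat ≤ 90) ∨ (97 ≤ c.toNat ∧ c.toNat ≤ 122) ∨ (48 ≤ c.toNat ∧ c.toNat ≤ 57) := by
  simp [PySem.Chars.isalnum, PySem.Chars.isalpha, pv_islower_iff, pv_isupper_iff, pv_isdigit_iff]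
  tauto

theorem pv_isalnum_upper (c : Char) : PySem.Chars.isalnum (PySem.Chars.upperChar c) = PySem.Chars.isalnum c := by
  simp only [PySem.Chars.upperChar]
  split
  · rename_i h
    rw [pv_islower_iff] at h
    have ht := pv_toNat_sub32 c h.1 h.2
    rw [Bool.eq_iff_iff, pv_isalnum_iff, pv_isalnum_iff, ht]
    omega
  · rfl

theorem pv_isalnum_lower (c : Char) : PySem.Chars.isalnum (PySem.Chars.lowerChar c) = PySem.Chars.isalnum c := by
  simp only [PySem.Chars.lowerChar]
  split
  · rename_i h
    rw [pv_isupper_iff] at h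
    have ht := pv_toNat_add32 c h.1 h.2
    rw [Bool.eq_iff_iff, pv_isalnum_iff, pv_isalnum_iff, ht]
    omega
  · rfl

theorem pv_upper_ne_underscore (c : Char) (h : c ≠ '_') : PySem.Chars.upperChar c ≠ '_' := by
  simp only [PySem.Chars.upperChar]
  split
  · rename_i hl
    rw [pv_islower_iff] at hl
    intro he
    have := congrArg Char.toNat he
    rw [pv_toNat_sub32 c hl.1 hl.2] at this
    rw [show ('_':Char).toNat = 95 from rfl] at this; omega
  · exact h

theorem pv_lower_ne_underscore (c : Char) (h : c ≠ '_') : PySem.Chars.lowerChar c ≠ '_' := by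
  simp only [PySem.Chars.lowerChar]
  split
  · rename_i hl
    rw [pv_isupper_iff] at hl
    intro he
    have := congrArg Char.toNat he
    rw [pv_toNat_add32 c hl.1 hl.2] at this
    rw [show ('_':Char).toNat = 95 from rfl] at this; omega
  · exact h

-- ---- replace with a single-char pattern is a map ----
theorem pv_replace_go (a b : Char) : ∀ (fuel : Nat) (l acc : List Char), l.length ≤ fuel →
    PySem.Chars.replace.go [a] [b] fuel l acc = acc.reverse ++ l.map (pvSubst a b) := by
  intro fuel
  induction fuel with
  | zero => intro l acc h; simp at h; subst h; simp [PySem.Chars.replace.go]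
  | succ n ih =>
    intro l acc h
    cases l with
    | nil => simp [PySem.Chars.replace.go]
    | cons c t =>
      rw [PySem.Chars.replace.go]
      simp only [List.isPrefixOf, List.map_cons, List.length_cons] at *
      by_cases hc : c = a
      · subst hc
        simp only [BEq.rfl, Bool.true_and, if_true, List.length_nil, List.drop_succ_cons,
          List.drop_zero, List.reverse_singleton, Nat.zero_add]
        rw [ih _ _ (by omega)]
        simp [pvSubst]
      · have hac : (a == c) = false := by simp; exact fun he => hc he.symm
        rw [if_neg (by simp [hac])]
        rw [ih _ _ (by omega)]
        simp [pvSubst, hc]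

theorem pv_replace_single (a b : Char) (s : List Char) :
    PySem.Chars.replace s [a] [b] = s.map (pvSubst a b) := by
  rw [PySem.Chars.replace, if_neg (by simp)]
  exact pv_replace_go a b s.length s [] (le_refl _)

-- ---- splitOn with no occurrence of the separator ----
theorem pv_splitOn_go_no (fuel : Nat) : ∀ (l cur : List Char) (acc : List (List Char)), (∀ c ∈ l, c ≠ ':') →
    PySem.Chars.splitOn.go [':'] fuel l cur acc = ((cur.reverse ++ l) :: acc).reverse := by
  induction fuel with
  | zero => intro l cur acc h; rw [PySem.Chars.splitOn.go]
  | succ n ih =>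
    intro l cur acc h
    cases l with
    | nil => rw [PySem.Chars.splitOn.go] <;> simp
    | cons c t =>
      rw [PySem.Chars.splitOn.go]
      have hc : c ≠ ':' := h c (by simp)
      rw [if_neg (by simp [List.isPrefixOf]; exact fun he => hc he.symm)]
      rw [ih t (c :: cur) acc (fun x hx => h x (by simp [hx]))]
      simp

theorem pv_splitOn_no_colon (s : List Char) (h : ':' ∉ s) :
    PySem.Chars.splitOn s [':'] = [s] := by
  rw [PySem.Chars.splitOn, pv_splitOn_go_no _ _ _ _ (fun c hc => by rintro rfl; exact h hc)]
  simp

-- ---- split₀ = pvWords ----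
theorem pv_split₀_go_spec : ∀ (l cur : List Char) (acc : List (List Char)),
    PySem.Chars.split₀.go l cur acc = acc.reverse ++
      (if cur.isEmpty then pvWords l
       else (cur.reverse ++ l.takeWhile (fun d => !PySem.Chars.isspace d)) ::
            pvWords (l.dropWhile (fun d => !PySem.Chars.isspace d))) := by
  intro l
  induction l with
  | nil =>
    intro cur acc
    rw [PySem.Chars.split₀.go]
    cases cur <;> simp [pvWords]
  | cons c cs ih =>
    intro cur acc
    rw [PySem.Chars.split₀.go]
    by_cases hs : PySem.Chars.isspace c
    · rw [if_pos hs]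
      cases cur with
      | nil =>
        simp only [List.isEmpty_nil, if_true]
        rw [ih [] acc]
        simp [pvWords, hs]
      | cons d ds =>
        simp only [List.isEmpty_cons, Bool.false_eq_true, if_false]
        rw [ih [] ((d :: ds).reverse :: acc)]
        simp [pvWords, hs]
    · rw [if_neg hs]
      rw [ih (c :: cur) acc]
      simp only [List.isEmpty_cons, Bool.false_eq_true, if_false, List.reverse_cons]
      cases cur with
      | nil => simp [pvWords, hs]
      | cons d ds => simp [pvWords, hs]

theorem pv_split₀_eq_words (s : List Char) : PySem.Chars.split₀ s = pvWords s := by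
  rw [PySem.Chars.split₀, pv_split₀_go_spec]
  simp

-- ---- the two single-char replaces act as pvSub2, and pvWords then is pvWordsB ----
theorem pv_isspace_sub2 (c : Char) : PySem.Chars.isspace (pvSub2 c) = pvSep c := by
  by_cases h1 : c = '-'
  · subst h1; simp [pvSub2, pvSubst, pvSep, PySem.Chars.isspace]
  · by_cases h2 : c = '_'
    · subst h2; simp [pvSub2, pvSubst, pvSep, PySem.Chars.isspace]
    · have hb1 : (c == '-') = false := by simpa using h1
      have hb2 : (c == '_') = false := by simpa using h2
      simp [pvSub2, pvSubst, pvSep, hb1, hb2, h1, h2]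

theorem pv_sub2_id (c : Char) (h : pvSep c = false) : pvSub2 c = c := by
  rw [pvSep] at h
  simp only [Bool.or_eq_false_iff, beq_eq_false_iff_ne, ne_eq] at h
  have hb1 : (c == '-') = false := by simpa using h.1.2
  have hb2 : (c == '_') = false := by simpa using h.2
  simp [pvSub2, pvSubst, hb1, hb2]

theorem pv_tw_sub2 (cs : List Char) :
    (cs.map pvSub2).takeWhile (fun d => !PySem.Chars.isspace d) = cs.takeWhile (fun d => !pvSep d) := by
  induction cs with
  | nil => simp
  | cons c t ih =>
    simp only [List.map_cons, List.takeWhile_cons, pv_isspace_sub2]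
    by_cases h : pvSep c
    · simp [h]
    · simp only [Bool.not_eq_true] at h
      simp [h, ih, pv_sub2_id c h]

theorem pv_dw_sub2 (cs : List Char) :
    (cs.map pvSub2).dropWhile (fun d => !PySem.Chars.isspace d) =
      (cs.dropWhile (fun d => !pvSep d)).map pvSub2 := by
  induction cs with
  | nil => simp
  | cons c t ih =>
    simp only [List.map_cons, List.dropWhile_cons, pv_isspace_sub2]
    by_cases h : pvSep c <;> simp [h, ih]

theorem pv_words_subst (n : List Char) : pvWords (n.map pvSub2) = pvWordsB n := by
  induction hn : n.length using Nat.strong_induction_on generalizing n with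
  | _ k ih =>
  cases n with
  | nil => simp [pvWords, pvWordsB]
  | cons c cs =>
    rw [List.map_cons, pvWords, pvWordsB, pv_isspace_sub2]
    by_cases h : pvSep c
    · rw [if_pos h, if_pos h]
      exact ih cs.length (by simp [← hn]) cs rfl
    · simp only [Bool.not_eq_true] at h
      rw [if_neg (by simp [h]), if_neg (by simp [h])]
      rw [pv_sub2_id c h, pv_tw_sub2, pv_dw_sub2]
      have hlen : (cs.dropWhile (fun d => !pvSep d)).length < k := by
        have := List.length_dropWhile_le (fun d => !pvSep d) cs
        simp [← hn]; omega
      rw [ih _ hlen _ rfl]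

-- ---- B's foldl computes pvScan ----
theorem pv_foldl_scan (s : List Char) : ∀ (acc : List Char) (flag : Bool),
    (s.foldl (fun (st : List Char × Bool) c =>
      if PySem.Chars.isspace c || c == '-' || c == '_' then (st.1, true)
      else if PySem.Chars.isalnum c then
        (st.1 ++ [if st.2 then PySem.Chars.upperChar c else PySem.Chars.lowerChar c], false)
      else (st.1, false)) (acc, flag)).1 = acc ++ pvScan s flag := by
  induction s with
  | nil => intro acc flag; simp [pvScan]
  | cons c cs ih =>
    intro acc flag
    rw [List.foldl_cons, pvScan]
    by_cases h : pvSep c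
    · rw [if_pos (by simpa [pvSep] using h), if_pos h, ih]
    · rw [if_neg (by simpa [pvSep] using h), if_neg h]
      by_cases ha : PySem.Chars.isalnum c
      · simp only [ha, if_true, ih]
        simp
      · simp only [ha, Bool.false_eq_true, if_false, ih]

-- ---- a lowered word with no '_' filtered by pvP ----
theorem pv_filter_word (l : List Char) (h : ∀ x ∈ l, x ≠ '_') :
    (l.map PySem.Chars.lowerChar).filter pvP = (l.filter PySem.Chars.isalnum).map PySem.Chars.lowerChar := by
  induction l with
  | nil => simp
  | cons c t ih =>
    simp only [List.map_cons, List.filter_cons]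
    have hc : pvP (PySem.Chars.lowerChar c) = PySem.Chars.isalnum c := by
      rw [pvP, pv_isalnum_lower]
      have := pv_lower_ne_underscore c (h c (by simp))
      simp [this]
    rw [hc]
    by_cases ha : PySem.Chars.isalnum c <;>
      simp [ha, ih (fun x hx => h x (by simp [hx]))]

-- ---- main invariant: the scan equals the filtered capitalized words ----
theorem pv_main (n : List Char) :
    pvScan n true = ((pvWordsB n).map (fun w => (pvCapitalize w).filter pvP)).flatten ∧
    pvScan n false =
      ((n.takeWhile (fun d => !pvSep d)).filter PySem.Chars.isalnum).map PySem.Chars.lowerChar ++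
      ((pvWordsB (n.dropWhile (fun d => !pvSep d))).map (fun w => (pvCapitalize w).filter pvP)).flatten := by
  induction hn : n.length using Nat.strong_induction_on generalizing n with
  | _ k ih =>
  cases n with
  | nil => simp [pvScan, pvWordsB]
  | cons c cs =>
    have ihcs := ih cs.length (by simp [← hn]) cs rfl
    by_cases h : pvSep c
    · constructor
      · rw [pvScan, if_pos h, pvWordsB, if_pos h, ihcs.1]
      · rw [pvScan, if_pos h, List.takeWhile_cons, List.dropWhile_cons]
        simp only [h, Bool.not_true, Bool.false_eq_true, if_false]
        rw [pvWordsB, if_pos h, ihcs.1]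
        simp
    · have hbu : (c == '_') = false := by
        rcases Bool.eq_false_iff.mp (Bool.not_eq_true _ ▸ h) with _
        simp only [pvSep, Bool.or_eq_true, not_or] at *
        simpa using fun he => by simp [he] at h
      have hcu : c ≠ '_' := by simpa using hbu
      have htw : ∀ x ∈ cs.takeWhile (fun d => !pvSep d), x ≠ '_' := by
        intro x hx
        have := List.mem_takeWhile_imp hx
        simp only [Bool.not_eq_true'] at this
        simp only [pvSep, Bool.or_eq_false_iff] at this
        simpa using this.2
      have hPup : pvP (PySem.Chars.upperChar c) = PySem.Chars.isalnum c := by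
        rw [pvP, pv_isalnum_upper]
        have := pv_upper_ne_underscore c hcu
        simp [this]
      have hf : pvSep c = false := by simpa using h
      have hW : pvWordsB (c :: cs) = (c :: cs.takeWhile (fun d => !pvSep d)) ::
          pvWordsB (cs.dropWhile (fun d => !pvSep d)) := by
        rw [pvWordsB, if_neg (by simp [hf])]
      constructor
      · rw [pvScan, if_neg (by simp [hf]), hW]
        rw [List.map_cons, List.flatten_cons,
          show pvCapitalize (c :: cs.takeWhile (fun d => !pvSep d)) =
            PySem.Chars.upperChar c :: (cs.takeWhile (fun d => !pvSep d)).map PySem.Chars.lowerChar from rfl,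
          List.filter_cons, hPup]
        by_cases ha : PySem.Chars.isalnum c
        · rw [if_pos ha, if_pos ha, ihcs.2, pv_filter_word _ htw]
          simp
        · rw [if_neg (by simp [ha]), if_neg (by simp [ha]), ihcs.2, pv_filter_word _ htw]
      · rw [pvScan, if_neg (by simp [hf]), List.takeWhile_cons, List.dropWhile_cons]
        have hPlo : pvP (PySem.Chars.lowerChar c) = PySem.Chars.isalnum c := by
          rw [pvP, pv_isalnum_lower]
          have := pv_lower_ne_underscore c hcu
          simp [this]
        simp only [hf, Bool.not_false, if_true, List.filter_cons]
        by_cases ha : PySem.Chars.isalnum c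
        · rw [if_pos ha, if_pos ha, ihcs.2, List.map_cons]
          simp
        · rw [if_neg (by simp [ha]), if_neg (by simp [ha]), ihcs.2]

-- ---- glue ----
theorem pv_flatten_intersperse (l : List (List Char)) : (List.intersperse [] l).flatten = l.flatten := by
  induction l with
  | nil => rfl
  | cons a t ih =>
    cases t with
    | nil => rfl
    | cons b u =>
      simp only [List.intersperse] at *
      rw [List.flatten_cons, List.flatten_cons, ih]
      simp

theorem pv_filename_eq (s : List Char) :
    (if PySem.Chars.isIn [':'] s then
      match PySem.List.pyGet? (PySem.Chars.splitOn s [':']) (-1) with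
      | some w => w
      | none => []
     else s) =
    (match PySem.List.pyGet? (PySem.Chars.splitOn s [':']) (-1) with
     | some w => w
     | none => []) := by
  by_cases h : PySem.Chars.isIn [':'] s
  · rw [if_pos h]
  · rw [if_neg h]
    have hmem : ':' ∉ s := by
      intro hm
      apply h
      rw [PySem.Chars.isIn_iff_infix]
      obtain ⟨u, v, rfl⟩ := List.append_of_mem hm
      exact ⟨u, v, by simp⟩
    rw [pv_splitOn_no_colon s hmem]
    simp [PySem.List.pyGet?, PySem.List.pyIdx?]

-- ===== VERDICT (by name: the statement is the Claim_ definition above) =====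
theorem derive_python_name_spec : Claim_equal_derive_python_name := by
  unfold Claim_equal_derive_python_name
  intro t _hd
  unfold Spec_derive_python_name derive_python_name derive_python_name_alt
  simp only [pv_filename_eq]
  generalize (match PySem.List.pyGet? (PySem.Chars.splitOn t.toList [':']) (-1) with
    | some w => w
    | none => ([] : List Char)) = tail
  generalize PySem.Chars.replace tail ".ctl".toList [] = m
  have hA : (PySem.Chars.join [] ((PySem.Chars.split₀
      (PySem.Chars.replace (PySem.Chars.replace m ['-'] [' ']) ['_'] [' '])).map pvCapitalize)).filter
        (fun c => PySem.Chars.isalnum c || c == '_') = pvScan m true := by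
    rw [pv_replace_single, pv_replace_single, List.map_map]
    have hmap : m.map (pvSubst '_' ' ' ∘ pvSubst '-' ' ') = m.map pvSub2 := rfl
    rw [hmap, pv_split₀_eq_words, pv_words_subst]
    rw [PySem.Chars.join, List.intercalate, pv_flatten_intersperse]
    rw [List.filter_flatten, List.map_map]
    exact ((pv_main m).1).symm
  have hB := pv_foldl_scan m [] true
  rw [hA, hB]
  simp
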